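-- pv_equiv track=rewrite | github.com/pvial00/EgyptU-The-Game | games/game0/game0.py | _alphabet_generatorB
-- ===== SOURCE A (Python) =====
-- def _alphabet_generatorB(n):
--     alphabet = {}
--     alphabet_list = []
--     for c in range(n):
--         x = c % 26
--         letter = chr(x  + 65)
--         alphabet[x % 13] = letter
--         alphabet_list.append(letter)
--     return alphabet, alphabet_list
-- ===== SOURCE B (Python) =====
-- def _last_letter(n, r):
--     # letter written last into slot r by the forward loop: largest c < n with c % 13 == r
--     return chr((n - 1 - ((n - 1 - r) % 13)) % 26 + 65)
--
-- def _alphabet_generatorB(n):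
--     alphabet_list = [chr(c % 26 + 65) for c in range(n)]
--     alphabet = {r: _last_letter(n, r) for r in range(min(n, 13))}
--     return alphabet, alphabet_list
-- ===== Notes on version B (the rewrite author's own statement) =====
-- stated objective: alternative
-- what changed: Replaces the single overwrite loop by two independent comprehensions: the letter list is a direct map over range(n), and the dict is built with at most 13 closed-form entries (the last writer of slot r is computed arithmetically) instead of n successive overwrites.
import Mathlib
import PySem

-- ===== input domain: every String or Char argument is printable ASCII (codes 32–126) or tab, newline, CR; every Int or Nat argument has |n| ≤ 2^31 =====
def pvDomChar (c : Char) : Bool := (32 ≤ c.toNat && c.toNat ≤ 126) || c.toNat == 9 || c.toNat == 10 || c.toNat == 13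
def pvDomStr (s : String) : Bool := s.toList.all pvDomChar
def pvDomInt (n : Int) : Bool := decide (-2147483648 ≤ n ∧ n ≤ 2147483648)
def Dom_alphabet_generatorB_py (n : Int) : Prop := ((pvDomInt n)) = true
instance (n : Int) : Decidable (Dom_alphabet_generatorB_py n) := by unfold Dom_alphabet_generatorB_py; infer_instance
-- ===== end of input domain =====

-- B replaces A's single overwrite loop by a direct map for the list and a 13-entry
-- closed-form dict (last writer of each slot computed arithmetically): alternative decomposition, same cost.


-- ===== PORT A =====
-- chr(i) for 0 ≤ i < 0x110000 (all our arguments are 65..90) — exact there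
def pvChr (i : Int) : String := String.ofList [Char.ofNat i.toNat]

-- the body of A's for-loop, acting on the (alphabet, alphabet_list) state
def pvStepA (st : PySem.Dict Int String × List String) (c : Int) :
    PySem.Dict Int String × List String :=
  let x := PySem.Int.mod c 26
  let letter := pvChr (x + 65)
  (st.1.insert (PySem.Int.mod x 13) letter, st.2 ++ [letter])

def alphabet_generatorB_py (n : Int) : (List (Int × String)) × List String :=
  let st := (PySem.List.pyRange 0 n 1).foldl pvStepA (PySem.Dict.empty, [])
  (st.1.items, st.2)

-- ===== PORT B =====
-- _last_letter(n, r): the letter of the largest c < n with c % 13 == r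
def pvLastLetter (n r : Int) : String :=
  pvChr (PySem.Int.mod (n - 1 - PySem.Int.mod (n - 1 - r) 13) 26 + 65)

def alphabet_generatorB_py_alt (n : Int) : (List (Int × String)) × List String :=
  let alphabet_list := (PySem.List.pyRange 0 n 1).map (fun c => pvChr (PySem.Int.mod c 26 + 65))
  let alphabet := (PySem.List.pyRange 0 (min n 13) 1).foldl
      (fun d r => d.insert r (pvLastLetter n r)) PySem.Dict.empty
  (alphabet.items, alphabet_list)

-- ===== PRECONDITION & SPEC =====
def Spec_alphabet_generatorB_py (n : Int) (out : (List (Int × String)) × List String) : Prop := out = alphabet_generatorB_py_alt n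
instance (n : Int) (out : (List (Int × String)) × List String) : Decidable (Spec_alphabet_generatorB_py n out) := by unfold Spec_alphabet_generatorB_py; infer_instance

-- ===== CLAIM (what is proved, stated in full; the proofs are below) =====
def Claim_equal_alphabet_generatorB_py : Prop := ∀ (n : Int), Dom_alphabet_generatorB_py n → Spec_alphabet_generatorB_py n (alphabet_generatorB_py n)

-- ===== LEMMAS AND PROOFS =====

-- the dict A's loop has built after the first m iterations, written as a literal items list
def pvModel (n : Int) : List (Int × String) :=
  (PySem.List.pyRange 0 (min n 13) 1).map (fun r => (r, pvLastLetter n r))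

def pvLModel (n : Int) : List String :=
  (PySem.List.pyRange 0 n 1).map (fun c => pvChr (PySem.Int.mod c 26 + 65))

-- (m % 26) % 13 = m % 13 (26 is a multiple of 13)
lemma pvKeyEq (m : Int) : PySem.Int.mod (PySem.Int.mod m 26) 13 = m % 13 := by
  rw [PySem.Int.mod_eq_emod_of_pos (by norm_num : (0:Int) < 26),
      PySem.Int.mod_eq_emod_of_pos (by norm_num : (0:Int) < 13)]
  omega

-- slots other than n % 13 keep their letter when the loop runs one step further
lemma pvValSuccNe (n r : Int) (hne : r ≠ n % 13) (h0 : 0 ≤ r) (h13 : r < 13) :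
    pvLastLetter (n + 1) r = pvLastLetter n r := by
  unfold pvLastLetter
  have h : n + 1 - 1 - PySem.Int.mod (n + 1 - 1 - r) 13 = n - 1 - PySem.Int.mod (n - 1 - r) 13 := by
    rw [PySem.Int.mod_eq_emod_of_pos (by norm_num : (0:Int) < 13),
        PySem.Int.mod_eq_emod_of_pos (by norm_num : (0:Int) < 13)]
    omega
  rw [h]

-- slot n % 13 receives the letter of c = n at step n
lemma pvValSuccSelf (n : Int) : pvLastLetter (n + 1) (n % 13) = pvChr (PySem.Int.mod n 26 + 65) := by
  unfold pvLastLetter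
  have h : n + 1 - 1 - PySem.Int.mod (n + 1 - 1 - n % 13) 13 = n := by
    rw [PySem.Int.mod_eq_emod_of_pos (by norm_num : (0:Int) < 13)]
    omega
  rw [h]

-- one step of A's dict update, on the closed-form model
lemma pvModelSucc (m : Int) (hm : 0 ≤ m) :
    (PySem.Dict.mk (pvModel m)).insert (m % 13) (pvChr (PySem.Int.mod m 26 + 65)) =
      PySem.Dict.mk (pvModel (m + 1)) := by
  apply PySem.Dict.ext
  have hkeys : (PySem.Dict.mk (pvModel m)).keys = PySem.List.pyRange 0 (min m 13) 1 := by
    simp [pvModel, PySem.Dict.keys, Function.comp_def]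
  by_cases h : m < 13
  · have hm13 : m % 13 = m := by omega
    rw [PySem.Dict.items_insert_of_not_contains _ _ (by
      rw [PySem.Dict.contains_eq_decide_mem_keys, hkeys]
      simp [PySem.List.mem_pyRange_one]; omega)]
    unfold pvModel
    rw [show min (m + 1) 13 = m + 1 by omega, show min m 13 = m by omega,
        PySem.List.pyRange_one_succ_right hm, List.map_append]
    show List.map (fun r => (r, pvLastLetter m r)) (PySem.List.pyRange 0 m) ++
          [(m % 13, pvChr (PySem.Int.mod m 26 + 65))] =
        List.map (fun r => (r, pvLastLetter (m + 1) r)) (PySem.List.pyRange 0 m) ++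
          List.map (fun r => (r, pvLastLetter (m + 1) r)) [m]
    congr 1
    · apply List.map_congr_left
      intro r hr
      rw [PySem.List.mem_pyRange_one] at hr
      exact congrArg (fun v => (r, v)) (pvValSuccNe m r (by omega) hr.1 (by omega)).symm
    · have hv := pvValSuccSelf m
      rw [hm13] at hv
      simp [hm13, hv]
  · rw [PySem.Dict.items_insert_of_contains _ _ (by
      rw [PySem.Dict.contains_eq_decide_mem_keys, hkeys]
      simp [PySem.List.mem_pyRange_one]; omega)]
    unfold pvModel
    rw [show min (m + 1) 13 = (13:Int) by omega, show min m 13 = (13:Int) by omega, List.map_map]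
    show List.map _ (PySem.List.pyRange 0 13) =
        List.map (fun r => (r, pvLastLetter (m + 1) r)) (PySem.List.pyRange 0 13)
    apply List.map_congr_left
    intro r hr
    rw [PySem.List.mem_pyRange_one] at hr
    by_cases hr' : r = m % 13
    · simp only [Function.comp_apply, hr', beq_self_eq_true, if_true]
      rw [pvValSuccSelf]
    · simp only [Function.comp_apply, beq_iff_eq, hr', if_false]
      rw [pvValSuccNe m r hr' hr.1 hr.2]

lemma pvLModelSucc (m : Int) (hm : 0 ≤ m) :
    pvLModel (m + 1) = pvLModel m ++ [pvChr (PySem.Int.mod m 26 + 65)] := by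
  unfold pvLModel
  rw [PySem.List.pyRange_one_succ_right hm, List.map_append]
  rfl

lemma pvFoldA (m : Nat) :
    (PySem.List.pyRange 0 (m : Int) 1).foldl pvStepA (PySem.Dict.empty, []) =
      (PySem.Dict.mk (pvModel (m : Int)), pvLModel (m : Int)) := by
  induction m with
  | zero => rfl
  | succ k ih =>
      have hc : ((k + 1 : Nat) : Int) = (k : Int) + 1 := by push_cast; ring
      rw [hc, PySem.List.pyRange_one_succ_right (by positivity : (0:Int) ≤ (k : Int)),
          List.foldl_append, ih]
      show ((PySem.Dict.mk (pvModel (k : Int))).insert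
              (PySem.Int.mod (PySem.Int.mod (k : Int) 26) 13)
              (pvChr (PySem.Int.mod (k : Int) 26 + 65)),
            pvLModel (k : Int) ++ [pvChr (PySem.Int.mod (k : Int) 26 + 65)]) =
          (PySem.Dict.mk (pvModel ((k : Int) + 1)), pvLModel ((k : Int) + 1))
      rw [pvKeyEq, pvModelSucc (k : Int) (by positivity), pvLModelSucc (k : Int) (by positivity)]

lemma pvFoldB (n : Int) :
    (PySem.List.pyRange 0 (min n 13) 1).foldl
        (fun d r => d.insert r (pvLastLetter n r)) PySem.Dict.empty =
      PySem.Dict.mk (pvModel n) := by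
  apply PySem.Dict.ext
  have h := PySem.Dict.items_foldl_insert_fresh (PySem.List.pyRange 0 (min n 13) 1)
      (fun r => r) (fun r => pvLastLetter n r) PySem.Dict.empty
      (fun a _ => PySem.Dict.contains_empty a)
      (by simpa using PySem.List.nodup_pyRange_one 0 (min n 13))
  simpa [pvModel, PySem.Dict.empty] using h

-- ===== VERDICT (by name: the statement is the Claim_ definition above) =====
theorem alphabet_generatorB_py_spec : Claim_equal_alphabet_generatorB_py := by
  intro n _
  unfold Spec_alphabet_generatorB_py alphabet_generatorB_py alphabet_generatorB_py_alt
  by_cases hn : n ≤ 0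
  · rw [PySem.List.pyRange_one_eq_nil (show n ≤ 0 by omega),
        PySem.List.pyRange_one_eq_nil (show min n 13 ≤ 0 by omega)]
    rfl
  · rw [pvFoldB]
    have hcast : n = ((n.toNat : Nat) : Int) := by omega
    rw [hcast, pvFoldA]
    rfl
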